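-- pv_equiv track=rewrite | github.com/betocmn/wannamigrate | django/wannamigrate/core/util.py | get_user_progress_css_class
-- ===== SOURCE A (Python) =====
-- def get_user_progress_css_class( percentage ):
--     """
--     Returns the css class for the approximate percentage for user registration data
--     :param: points
--     :param: css_class_color
--     :return: String
--     """
--
--     # If zero, return the minimum class
--     if percentage == 0:
--         return 'progressFillDarkOrange progressFillSize5'
--
--     # if it's 100% full
--     if percentage >= 100:
--         return 'progressFillGreen progressFillSize100'
--
--     # These are the percentages defined by css classes in 'style.css'
--     possible_percentages = [5, 10, 15, 20, 25, 30, 35, 40, 45, 50, 55, 60, 65, 70, 75, 80, 85, 90, 95, 100]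
--
--     # Define the color of the bar
--     if percentage <= 25:
--         color = 'progressFillDarkOrange progressFillSize'
--     elif percentage <= 50:
--         color = 'progressFillOrange progressFillSize'
--     elif percentage <= 75:
--         color = 'progressFillYellow progressFillSize'
--     else:
--         color = 'progressFillGreen progressFillSize'
--
--     # We will find the nearest number on the possible list to represent it
--     list_size = len( possible_percentages )
--     for count in range( 0, list_size ):
--         if percentage < possible_percentages[count]:
--             if count == 0:
--                 return color + str( possible_percentages[count] )
--             else:
--                 return color + str( possible_percentages[count-1] )
--         elif ( count + 1 ) == list_size:
--             return color + str( possible_percentages[count-1] )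
--
--     return ''
-- ===== SOURCE B (Python) =====
-- def get_user_progress_css_class(percentage):
--     if percentage == 0:
--         return 'progressFillDarkOrange progressFillSize5'
--     if percentage >= 100:
--         return 'progressFillGreen progressFillSize100'
--     if percentage <= 25:
--         color = 'progressFillDarkOrange progressFillSize'
--     elif percentage <= 50:
--         color = 'progressFillOrange progressFillSize'
--     elif percentage <= 75:
--         color = 'progressFillYellow progressFillSize'
--     else:
--         color = 'progressFillGreen progressFillSize'
--     size = max(5, (percentage // 5) * 5)
--     return color + str(size)
-- ===== Notes on version B (the rewrite author's own statement) =====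
-- stated objective: simpler
-- what changed: Replaced A's linear scan of the 20-entry possible_percentages list with the closed-form size computation max(5, (percentage // 5) * 5).
import Mathlib
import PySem

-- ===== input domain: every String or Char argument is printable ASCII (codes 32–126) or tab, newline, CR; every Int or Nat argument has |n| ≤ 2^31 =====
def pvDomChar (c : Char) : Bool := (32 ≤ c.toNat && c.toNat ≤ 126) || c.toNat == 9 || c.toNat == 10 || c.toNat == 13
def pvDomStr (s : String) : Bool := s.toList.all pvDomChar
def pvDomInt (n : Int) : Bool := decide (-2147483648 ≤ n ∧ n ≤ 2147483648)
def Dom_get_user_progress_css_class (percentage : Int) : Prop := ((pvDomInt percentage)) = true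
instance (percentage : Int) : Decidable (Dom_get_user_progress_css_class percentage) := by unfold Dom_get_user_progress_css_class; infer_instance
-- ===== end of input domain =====

-- B replaces A's linear scan of the 20-entry possible_percentages list by the closed form
-- max(5, (percentage // 5) * 5); return value equivalence proved on all Int inputs (A is total).

-- ===== PORT A =====
-- the 'for count in range(0, list_size)' loop of A, transliterated over the list of index values
def pvALoop (percentage : Int) (possible : List Int) (color : String) : List Int → String
  | [] => ""
  | count :: rest =>
      if percentage < PySem.List.pyGetD possible count 0 then
        if count = 0 then color ++ PySem.Int.toStr (PySem.List.pyGetD possible count 0)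
        else color ++ PySem.Int.toStr (PySem.List.pyGetD possible (count - 1) 0)
      else if count + 1 = (possible.length : Int) then
        color ++ PySem.Int.toStr (PySem.List.pyGetD possible (count - 1) 0)
      else pvALoop percentage possible color rest

def get_user_progress_css_class (percentage : Int) : String :=
  if percentage = 0 then "progressFillDarkOrange progressFillSize5"
  else if percentage ≥ 100 then "progressFillGreen progressFillSize100"
  else
    let possible : List Int := [5, 10, 15, 20, 25, 30, 35, 40, 45, 50, 55, 60, 65, 70, 75, 80, 85, 90, 95, 100]
    let color : String :=
      if percentage ≤ 25 then "progressFillDarkOrange progressFillSize"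
      else if percentage ≤ 50 then "progressFillOrange progressFillSize"
      else if percentage ≤ 75 then "progressFillYellow progressFillSize"
      else "progressFillGreen progressFillSize"
    pvALoop percentage possible color (PySem.List.pyRange 0 (possible.length : Int) 1)

-- ===== PORT B =====
def get_user_progress_css_class_alt (percentage : Int) : String :=
  if percentage = 0 then "progressFillDarkOrange progressFillSize5"
  else if percentage ≥ 100 then "progressFillGreen progressFillSize100"
  else
    let color : String :=
      if percentage ≤ 25 then "progressFillDarkOrange progressFillSize"
      else if percentage ≤ 50 then "progressFillOrange progressFillSize"
      else if percentage ≤ 75 then "progressFillYellow progressFillSize"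
      else "progressFillGreen progressFillSize"
    let size : Int := max 5 (PySem.Int.floordiv percentage 5 * 5)
    color ++ PySem.Int.toStr size

-- ===== PRECONDITION & SPEC =====
def Spec_get_user_progress_css_class (percentage : Int) (out : String) : Prop := out = get_user_progress_css_class_alt percentage
instance (percentage : Int) (out : String) : Decidable (Spec_get_user_progress_css_class percentage out) := by unfold Spec_get_user_progress_css_class; infer_instance

-- ===== CLAIM (what is proved, stated in full; the proofs are below) =====
def Claim_equal_get_user_progress_css_class : Prop := ∀ (percentage : Int), Dom_get_user_progress_css_class percentage → Spec_get_user_progress_css_class percentage (get_user_progress_css_class percentage)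

-- ===== LEMMAS AND PROOFS =====

-- the finitely many positive inputs below 100, checked one by one
theorem pv_pos_case : ∀ n : Nat, n < 99 →
    get_user_progress_css_class ((n : Int) + 1) = get_user_progress_css_class_alt ((n : Int) + 1) := by
  decide

-- the loop returns color + '5' immediately for any percentage below the first threshold
theorem pvALoop_lt5 (p : Int) (color : String) (rest : List Int) (h : p < 5) :
    pvALoop p [5, 10, 15, 20, 25, 30, 35, 40, 45, 50, 55, 60, 65, 70, 75, 80, 85, 90, 95, 100]
      color ((0 : Int) :: rest) = color ++ PySem.Int.toStr 5 := by
  have h0 : PySem.List.pyGetD ([5, 10, 15, 20, 25, 30, 35, 40, 45, 50, 55, 60, 65, 70, 75, 80, 85, 90, 95, 100] : List Int) 0 0 = 5 := by decide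
  simp only [pvALoop, h0]
  rw [if_pos h]
  simp

theorem pv_neg_case (p : Int) (hp : p < 0) :
    get_user_progress_css_class p = get_user_progress_css_class_alt p := by
  have h5 : PySem.Int.floordiv p 5 * 5 + PySem.Int.mod p 5 = p := PySem.Int.floordiv_mul_add_mod p 5
  have hm : 0 ≤ PySem.Int.mod p 5 := PySem.Int.mod_nonneg p (by norm_num)
  have hmax : max 5 (PySem.Int.floordiv p 5 * 5) = 5 := by omega
  unfold get_user_progress_css_class get_user_progress_css_class_alt
  rw [if_neg (by omega : ¬ p = 0), if_neg (by omega : ¬ p ≥ 100)]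
  rw [if_neg (by omega : ¬ p = 0), if_neg (by omega : ¬ p ≥ 100)]
  simp only [if_pos (by omega : p ≤ 25), hmax]
  rw [show PySem.List.pyRange 0 (([5, 10, 15, 20, 25, 30, 35, 40, 45, 50, 55, 60, 65, 70, 75, 80, 85, 90, 95, 100] : List Int).length : Int) =
      (0 : Int) :: [1, 2, 3, 4, 5, 6, 7, 8, 9, 10, 11, 12, 13, 14, 15, 16, 17, 18, 19] from by decide]
  exact pvALoop_lt5 p _ _ (by omega)

-- ===== VERDICT (by name: the statement is the Claim_ definition above) =====
theorem get_user_progress_css_class_spec : Claim_equal_get_user_progress_css_class := by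
  intro p _
  unfold Spec_get_user_progress_css_class
  rcases lt_trichotomy p 0 with hneg | hz | hpos
  · exact pv_neg_case p hneg
  · subst hz; decide
  · by_cases h100 : 100 ≤ p
    · unfold get_user_progress_css_class get_user_progress_css_class_alt
      rw [if_neg (by omega : ¬ p = 0), if_pos (by omega : p ≥ 100),
          if_neg (by omega : ¬ p = 0), if_pos (by omega : p ≥ 100)]
    · have hn : p = ((p - 1).toNat : Int) + 1 := by omega
      have := pv_pos_case (p - 1).toNat (by omega)
      rw [hn]
      exact this
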